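-- pv_equiv track=rewrite | github.com/odilonneto/Ong-Project | adotepets/ongs/models.py | find_last_cnpj_numbers
-- ===== SOURCE A (Python) =====
-- def find_last_cnpj_numbers(cnpj):
--     sum = 0
--     if len(cnpj) == 12:
--         multiplier = 5
--     else:
--         multiplier = 6
--     for number in cnpj:
--         number = int(number)
--         if multiplier == 1:
--             multiplier = 9
--         sum += number * multiplier
--         multiplier -= 1
--     rest = sum % 11
--     if rest < 2:
--         return '0'
--     else:
--         return str(11 - rest)
-- ===== SOURCE B (Python) =====
-- def find_last_cnpj_numbers(cnpj):
--     start = 5 if len(cnpj) == 12 else 6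
--     # fixed 8-weight table: start,start-1,...,2 then 9,8,...,start+1
--     weights = list(range(start, 1, -1)) + list(range(9, start, -1))
--     total = 0
--     for j in range(0, len(cnpj), 8):
--         total += sum(w * int(d) for w, d in zip(weights, cnpj[j:j+8]))
--     rest = total % 11
--     return '0' if rest < 2 else str(11 - rest)
-- ===== Notes on version B (the rewrite author's own statement) =====
-- stated objective: alternative
-- what changed: B precomputes the fixed 8-entry weight table once (as the concatenation of two ranges, no wrap logic) and processes the string in blocks of 8 characters, dotting each block against the table with zip, instead of A's single pass carrying a mutable decrement-and-wrap multiplier.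
import Mathlib
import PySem

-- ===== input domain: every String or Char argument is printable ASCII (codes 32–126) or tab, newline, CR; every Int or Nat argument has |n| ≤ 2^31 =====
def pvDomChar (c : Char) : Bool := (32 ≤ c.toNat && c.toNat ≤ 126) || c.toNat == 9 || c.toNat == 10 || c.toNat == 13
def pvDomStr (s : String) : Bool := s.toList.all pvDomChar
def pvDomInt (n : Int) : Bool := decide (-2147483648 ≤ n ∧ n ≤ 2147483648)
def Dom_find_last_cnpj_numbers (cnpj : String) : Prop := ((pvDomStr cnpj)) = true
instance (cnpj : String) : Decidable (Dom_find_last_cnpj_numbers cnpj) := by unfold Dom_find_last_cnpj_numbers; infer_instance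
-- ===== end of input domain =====

-- B replaces A's mutable decrement-and-wrap multiplier pass by a precomputed
-- 8-entry weight table (two concatenated ranges) dotted against the string in
-- blocks of 8 via zip (objective: alternative; same O(n) cost).

-- ===== PORT A =====
-- int(number): PySem.Int.ofStr? none = ValueError; the .getD 0 is unreachable under Pre_ (all chars digits)
def find_last_cnpj_numbers (cnpj : String) : String :=
  let multiplier : Int := if cnpj.toList.length = 12 then 5 else 6
  let st : Int × Int := cnpj.toList.foldl
    (fun (p : Int × Int) c =>
      ((p.1 + ((PySem.Int.ofStr? (String.mk [c])).getD 0) * (if p.2 = 1 then 9 else p.2)),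
       (if p.2 = 1 then 9 else p.2) - 1))
    (0, multiplier)
  let rest : Int := PySem.Int.mod st.1 11
  if rest < 2 then "0" else PySem.Int.toStr (11 - rest)

-- ===== PORT B =====
def find_last_cnpj_numbers_alt (cnpj : String) : String :=
  let l := cnpj.toList
  let start : Int := if l.length = 12 then 5 else 6
  let weights : List Int := PySem.List.pyRange start 1 (-1) ++ PySem.List.pyRange 9 start (-1)
  let total : Int := (PySem.List.pyRange 0 (l.length : Int) 8).foldl
    (fun total j =>
      total + ((weights.zip (PySem.List.slice l (some j) (some (j + 8)))).map
        (fun p => p.1 * (PySem.Int.ofStr? (String.mk [p.2])).getD 0)).sum) 0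
  let rest : Int := PySem.Int.mod total 11
  if rest < 2 then "0" else PySem.Int.toStr (11 - rest)

-- ===== PRECONDITION & SPEC =====
-- Pre_ excludes exactly the inputs where Python's int(number) raises ValueError:
-- any string containing a non-digit character.
def Pre_find_last_cnpj_numbers (cnpj : String) : Prop :=
  cnpj.toList.all Char.isDigit = true
instance (cnpj : String) : Decidable (Pre_find_last_cnpj_numbers cnpj) := by
  unfold Pre_find_last_cnpj_numbers; infer_instance

def pvWitness_find_last_cnpj_numbers : String := "123456789012"

def Spec_find_last_cnpj_numbers (cnpj : String) (out : String) : Prop := out = find_last_cnpj_numbers_alt cnpj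
instance (cnpj : String) (out : String) : Decidable (Spec_find_last_cnpj_numbers cnpj out) := by unfold Spec_find_last_cnpj_numbers; infer_instance

-- ===== CLAIM (what is proved, stated in full; the proofs are below) =====
def Claim_equal_find_last_cnpj_numbers : Prop := ∀ (cnpj : String), Dom_find_last_cnpj_numbers cnpj → Pre_find_last_cnpj_numbers cnpj → Spec_find_last_cnpj_numbers cnpj (find_last_cnpj_numbers cnpj)

-- ===== LEMMAS AND PROOFS =====

-- the digit value of one character, as both ports compute it
def pvDig (c : Char) : Int := (PySem.Int.ofStr? (String.mk [c])).getD 0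

-- B's per-block dot product: zip the weight table with a block of characters
def pvDotZip (w : List Int) (t : List Char) : Int :=
  ((w.zip t).map (fun p => p.1 * pvDig p.2)).sum

-- dot product of a character list with a cyclic weight table (rotated per step)
def pvDotC : List Char → List Int → Int
  | [], _ => 0
  | c :: t, w => w.headD 0 * pvDig c + pvDotC t (w.rotate 1)

-- the weight table that A's multiplier state m generates
def pvWl (m : Int) : List Int :=
  PySem.List.pyRange m 1 (-1) ++ PySem.List.pyRange 9 m (-1)

theorem pvWlFacts (m : Int) (h1 : 1 ≤ m) (h9 : m ≤ 9) :
    (pvWl m).headD 0 = (if m = 1 then 9 else m) ∧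
    (pvWl m).rotate 1 = pvWl ((if m = 1 then 9 else m) - 1) := by
  interval_cases m <;> exact ⟨by decide, by decide⟩

-- A's loop invariant: the running sum is the cyclic dot product with pvWl m.
theorem pvLoopA (l : List Char) (s m : Int) (h1 : 1 ≤ m) (h9 : m ≤ 9) :
    (l.foldl
      (fun (p : Int × Int) c =>
        ((p.1 + ((PySem.Int.ofStr? (String.mk [c])).getD 0) * (if p.2 = 1 then 9 else p.2)),
         (if p.2 = 1 then 9 else p.2) - 1))
      (s, m)).1 = s + pvDotC l (pvWl m) := by
  induction l generalizing s m with
  | nil => simp [pvDotC]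
  | cons c t ih =>
    obtain ⟨hh, hr⟩ := pvWlFacts m h1 h9
    simp only [List.foldl_cons, pvDotC, hh, hr]
    rw [ih _ _ (by split_ifs with h <;> omega) (by split_ifs with h <;> omega)]
    simp [pvDig]; ring

-- zip truncates: only the first |t| weights matter
theorem pvZipTrunc (t : List Char) (u v : List Int) (h : t.length ≤ u.length) :
    pvDotZip (u ++ v) t = pvDotZip u t := by
  induction t generalizing u with
  | nil => simp [pvDotZip]
  | cons c t ih =>
    cases u with
    | nil => simp at h
    | cons x u =>
      simp only [pvDotZip, List.cons_append, List.zip_cons_cons, List.map_cons, List.sum_cons]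
      have := ih u (by simpa using h)
      simp only [pvDotZip] at this
      rw [this]

-- splitting the cyclic dot product at a block boundary
theorem pvSplit (t d : List Char) (w : List Int) (h : t.length ≤ w.length) :
    pvDotC (t ++ d) w = pvDotZip w t + pvDotC d (w.rotate t.length) := by
  induction t generalizing w d with
  | nil => simp [pvDotZip]
  | cons c t ih =>
    cases w with
    | nil => simp at h
    | cons x u =>
      have h' : t.length ≤ u.length := by simp at h; omega
      simp only [List.cons_append, pvDotC, List.headD_cons, List.length_cons]
      have hrot1 : (x :: u).rotate 1 = u ++ [x] := by
        simpa using List.rotate_cons_succ u x 0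
      rw [hrot1, ih d (u ++ [x]) (by simp; omega)]
      rw [pvZipTrunc t u [x] h']
      have h4 : (u ++ [x]).rotate t.length = (x :: u).rotate (t.length + 1) := by
        rw [← hrot1, List.rotate_rotate, Nat.add_comm]
      rw [h4]
      simp only [pvDotZip, List.zip_cons_cons, List.map_cons, List.sum_cons]
      ring

-- pyRange with step 8 unfolds one element at a time
theorem pvRangeCons8 (a b : Int) (h : a < b) :
    PySem.List.pyRange a b 8 = a :: PySem.List.pyRange (a + 8) b 8 := by
  rw [PySem.List.pyRange_of_pos a b (by norm_num),
      PySem.List.pyRange_of_pos (a + 8) b (by norm_num)]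
  have hN : (if a < b then ((b - a + 8 - 1) / 8).toNat else 0)
      = (if a + 8 < b then ((b - (a + 8) + 8 - 1) / 8).toNat else 0) + 1 := by
    split_ifs <;> omega
  rw [hN, List.range_succ_eq_map, List.map_cons, List.map_map]
  congr 1
  · push_cast; ring
  · apply List.map_congr_left
    intro k _
    simp only [Function.comp_apply]
    push_cast
    ring

-- pyRange 8 b 8 is pyRange 0 (b-8) 8 shifted by 8
theorem pvRangeShift8 (b : Int) :
    PySem.List.pyRange 8 b 8 = (PySem.List.pyRange 0 (b - 8) 8).map (fun j => j + 8) := by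
  rw [PySem.List.pyRange_of_pos 8 b (by norm_num),
      PySem.List.pyRange_of_pos 0 (b - 8) (by norm_num), List.map_map]
  have hc : (if (8:Int) < b then ((b - 8 + 8 - 1) / 8).toNat else 0)
      = (if (0:Int) < b - 8 then ((b - 8 - 0 + 8 - 1) / 8).toNat else 0) := by
    split_ifs <;> omega
  rw [hc]
  apply List.map_congr_left
  intro k _
  simp [Function.comp]
  ring

-- B's chunked fold computes the cyclic dot product with any 8-entry table.
theorem pvBfold (n : Nat) (l : List Char) (w : List Int)
    (hl : l.length = n) (hw : w.length = 8) :
    (PySem.List.pyRange 0 (n : Int) 8).foldl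
      (fun tot j => tot + pvDotZip w (PySem.List.slice l (some j) (some (j + 8)))) 0
    = pvDotC l w := by
  induction n using Nat.strong_induction_on generalizing l with
  | _ n ih =>
    cases Nat.eq_zero_or_pos n with
    | inl h0 =>
      subst h0
      have hl0 : l = [] := List.eq_nil_of_length_eq_zero hl
      subst hl0
      simp [PySem.List.pyRange_of_pos 0 0 (by norm_num : (0:Int) < 8), pvDotC]
    | inr hpos =>
      rw [pvRangeCons8 0 (n : Int) (by exact_mod_cast hpos), List.foldl_cons]
      have hsl0 : PySem.List.slice l (some 0) (some (0 + 8)) = l.take 8 := by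
        rw [PySem.List.slice_toNat l (by norm_num) (by norm_num)]
        simp
      rw [hsl0, PySem.List.foldl_add, zero_add, zero_add, pvRangeShift8, List.map_map]
      have hmap : ∀ j ∈ PySem.List.pyRange 0 ((n : Int) - 8) 8,
          pvDotZip w (PySem.List.slice l (some (j + 8)) (some (j + 8 + 8)))
          = pvDotZip w (PySem.List.slice (l.drop 8) (some j) (some (j + 8))) := by
        intro j hj
        have hj0 : 0 ≤ j := ((PySem.List.mem_pyRange_iff_of_pos (by norm_num) j).mp hj).1
        rw [PySem.List.slice_toNat l (by omega) (by omega),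
            PySem.List.slice_toNat (l.drop 8) hj0 (by omega)]
        have e1 : (j + 8 + 8).toNat - (j + 8).toNat = 8 := by omega
        have e3 : (j + 8).toNat - j.toNat = 8 := by omega
        rw [e1, e3]
        have e2 : (j + 8).toNat = j.toNat + 8 := by omega
        rw [e2]
        have hdd : List.drop j.toNat (List.drop 8 l) = List.drop (j.toNat + 8) l := by
          rw [List.drop_drop]; congr 1; omega
        rw [hdd]
      have hcomp : ((fun j => pvDotZip w (PySem.List.slice l (some j) (some (j + 8))))
            ∘ fun j => j + 8)
          = fun j => pvDotZip w (PySem.List.slice l (some (j + 8)) (some (j + 8 + 8))) := rfl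
      rw [hcomp, List.map_congr_left hmap]
      by_cases h8 : 8 ≤ n
      · have hrec := ih (n - 8) (by omega) (l.drop 8) (by simp [hl])
        rw [PySem.List.foldl_add, zero_add] at hrec
        have hc : ((n - 8 : Nat) : Int) = (n : Int) - 8 := by omega
        rw [← hc, hrec]
        have hsplit := pvSplit (l.take 8) (l.drop 8) w
          (by simp [hl]; omega)
        rw [List.take_append_drop] at hsplit
        rw [hsplit]
        have : (l.take 8).length = 8 := by simp [hl]; omega
        rw [this, ← hw, List.rotate_length]
      · have hlt : (n : Int) - 8 ≤ 0 := by omega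
        have hempty : PySem.List.pyRange 0 ((n : Int) - 8) 8 = [] := by
          rw [PySem.List.pyRange_of_pos 0 ((n:Int) - 8) (by norm_num)]
          rw [if_neg (by omega)]
          simp
        rw [hempty]
        simp only [List.map_nil, List.sum_nil, add_zero]
        have htake : l.take 8 = l := List.take_of_length_le (by omega)
        rw [htake]
        have := pvSplit l [] w (by omega)
        simp [pvDotC] at this
        rw [this]

-- ===== VERDICT (by name: the statement is the Claim_ definition above) =====
theorem find_last_cnpj_numbers_spec : Claim_equal_find_last_cnpj_numbers := by
  intro cnpj _ _
  unfold Spec_find_last_cnpj_numbers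
  show find_last_cnpj_numbers cnpj = find_last_cnpj_numbers_alt cnpj
  simp only [find_last_cnpj_numbers, find_last_cnpj_numbers_alt]
  by_cases h12 : cnpj.toList.length = 12
  · rw [if_pos h12]
    have hfold :
        (fun (tot j : Int) => tot +
          (((PySem.List.pyRange (5:Int) 1 (-1) ++ PySem.List.pyRange 9 5 (-1)).zip
                (PySem.List.slice cnpj.toList (some j) (some (j + 8)))).map
            (fun p => p.1 * (PySem.Int.ofStr? (String.mk [p.2])).getD 0)).sum)
        = (fun tot j => tot + pvDotZip (pvWl 5)
            (PySem.List.slice cnpj.toList (some j) (some (j + 8)))) := rfl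
    rw [hfold, pvBfold cnpj.toList.length cnpj.toList (pvWl 5) rfl (by decide),
        pvLoopA cnpj.toList 0 5 (by norm_num) (by norm_num), zero_add]
  · rw [if_neg h12]
    have hfold :
        (fun (tot j : Int) => tot +
          (((PySem.List.pyRange (6:Int) 1 (-1) ++ PySem.List.pyRange 9 6 (-1)).zip
                (PySem.List.slice cnpj.toList (some j) (some (j + 8)))).map
            (fun p => p.1 * (PySem.Int.ofStr? (String.mk [p.2])).getD 0)).sum)
        = (fun tot j => tot + pvDotZip (pvWl 6)
            (PySem.List.slice cnpj.toList (some j) (some (j + 8)))) := rfl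
    rw [hfold, pvBfold cnpj.toList.length cnpj.toList (pvWl 6) rfl (by decide),
        pvLoopA cnpj.toList 0 6 (by norm_num) (by norm_num), zero_add]
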